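-- pv_equiv track=rewrite | github.com/JonoKumarich/advent-of-code-2024 | src/aoc/day_12.py | find_total_corners
-- ===== SOURCE A (Python) =====
-- def find_total_corners(
--     possible: set[tuple[int, int]],
-- ) -> int:
--     corners = 0
--     for square in possible:
--         verticals = {(square[0] - 1, square[1]), (square[0], square[1] - 1)}
--         diagonal = (square[0] - 1, square[1] - 1)
--         corners += num_corners(possible, verticals, diagonal)
--
--         verticals = {(square[0] - 1, square[1]), (square[0], square[1] + 1)}
--         diagonal = (square[0] - 1, square[1] + 1)
--         corners += num_corners(possible, verticals, diagonal)
--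
--
--         verticals = {(square[0] + 1, square[1]), (square[0], square[1] + 1)}
--         diagonal = (square[0] + 1, square[1] + 1)
--         corners += num_corners(possible, verticals, diagonal)
--
--         verticals = {(square[0] + 1, square[1]), (square[0], square[1] - 1)}
--         diagonal = (square[0] + 1, square[1] - 1)
--         corners += num_corners(possible, verticals, diagonal)
--
--
--     return corners
--
-- def num_corners(
--     possible: set[tuple[int, int]],
--     verticals: set[tuple[int, int]],
--     diagonal: tuple[int, int],
-- ) -> int:
--     num_verticals = len(set(v for v in verticals if v in possible))
--
--     if num_verticals == 0:
--         return 1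
--     elif num_verticals == 2 and diagonal not in possible:
--         return 1
--     else:
--         return 0
-- ===== SOURCE B (Python) =====
-- def find_total_corners(
--     possible: set[tuple[int, int]],
-- ) -> int:
--     cells = set(possible)
--     points = set()
--     for (x, y) in cells:
--         points.update({(x, y), (x + 1, y), (x, y + 1), (x + 1, y + 1)})
--     total = 0
--     for (px, py) in points:
--         a = (px - 1, py - 1) in cells
--         b = (px, py - 1) in cells
--         c = (px - 1, py) in cells
--         d = (px, py) in cells
--         k = a + b + c + d
--         if k == 1 or k == 3:
--             total += 1
--         elif k == 2 and a == d:
--             total += 2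
--     return total
-- ===== Notes on version B (the rewrite author's own statement) =====
-- stated objective: alternative
-- what changed: B inverts the traversal: instead of checking four corner directions per cell with neighbour/diagonal membership tests, it collects the lattice corner points of all cells into a set and classifies each point once by the 2x2 block of cells around it (1 or 3 cells present = 1 corner, a diagonal pair = 2 corners).
import Mathlib
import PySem

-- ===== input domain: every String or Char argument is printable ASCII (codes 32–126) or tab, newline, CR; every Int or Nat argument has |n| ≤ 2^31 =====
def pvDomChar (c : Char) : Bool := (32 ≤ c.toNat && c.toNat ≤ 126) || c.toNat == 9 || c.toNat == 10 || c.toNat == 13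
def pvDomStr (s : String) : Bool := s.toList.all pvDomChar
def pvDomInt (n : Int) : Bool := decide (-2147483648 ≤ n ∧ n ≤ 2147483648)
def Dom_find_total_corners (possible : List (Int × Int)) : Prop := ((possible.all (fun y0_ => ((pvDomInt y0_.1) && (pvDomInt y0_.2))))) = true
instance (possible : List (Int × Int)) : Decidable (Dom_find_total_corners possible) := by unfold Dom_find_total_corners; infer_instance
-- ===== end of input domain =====

-- B counts corners by classifying each lattice corner point's 2x2 cell block once, instead of A's four per-cell direction checks; same cost, different traversal.


-- ===== PORT A =====
def pv_num_corners (possible : List (Int × Int)) (verticals : PySem.Set (Int × Int)) (diagonal : Int × Int) : Int :=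
  let num_verticals := PySem.Set.len (PySem.Set.ofList (verticals.filter (fun v => PySem.Set.contains possible v)))
  if num_verticals = 0 then 1
  else if num_verticals = 2 ∧ PySem.Set.contains possible diagonal = false then 1
  else 0

def find_total_corners (possible : List (Int × Int)) : Int :=
  possible.foldl (fun corners square =>
    let corners := corners + pv_num_corners possible
      (PySem.Set.ofList [(square.1 - 1, square.2), (square.1, square.2 - 1)]) (square.1 - 1, square.2 - 1)
    let corners := corners + pv_num_corners possible
      (PySem.Set.ofList [(square.1 - 1, square.2), (square.1, square.2 + 1)]) (square.1 - 1, square.2 + 1)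
    let corners := corners + pv_num_corners possible
      (PySem.Set.ofList [(square.1 + 1, square.2), (square.1, square.2 + 1)]) (square.1 + 1, square.2 + 1)
    let corners := corners + pv_num_corners possible
      (PySem.Set.ofList [(square.1 + 1, square.2), (square.1, square.2 - 1)]) (square.1 + 1, square.2 - 1)
    corners) 0

-- ===== PORT B =====
def find_total_corners_alt (possible : List (Int × Int)) : Int :=
  let cells := PySem.Set.ofList possible
  let points := cells.foldl (fun pts c =>
      PySem.Set.update pts [(c.1, c.2), (c.1 + 1, c.2), (c.1, c.2 + 1), (c.1 + 1, c.2 + 1)])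
    PySem.Set.empty
  points.foldl (fun total p =>
    let a := PySem.Set.contains cells (p.1 - 1, p.2 - 1)
    let b := PySem.Set.contains cells (p.1, p.2 - 1)
    let c := PySem.Set.contains cells (p.1 - 1, p.2)
    let d := PySem.Set.contains cells (p.1, p.2)
    let k : Int := (if a then 1 else 0) + (if b then 1 else 0) + (if c then 1 else 0) + (if d then 1 else 0)
    if k = 1 ∨ k = 3 then total + 1
    else if k = 2 ∧ a = d then total + 2
    else total) 0

-- ===== PRECONDITION & SPEC =====
-- The Python parameter is a set; its List port holds the distinct elements, so Pre_ states
-- that the list has no duplicates (on a duplicated list A's loop would count entries twice).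
def Pre_find_total_corners (possible : List (Int × Int)) : Prop := possible.Nodup
instance (possible : List (Int × Int)) : Decidable (Pre_find_total_corners possible) := by
  unfold Pre_find_total_corners; infer_instance

def pvWitness_find_total_corners : (List (Int × Int)) := [(0, 0), (1, 0), (1, 1)]

def Spec_find_total_corners (possible : List (Int × Int)) (out : Int) : Prop := out = find_total_corners_alt possible
instance (possible : List (Int × Int)) (out : Int) : Decidable (Spec_find_total_corners possible out) := by unfold Spec_find_total_corners; infer_instance

-- ===== CLAIM (what is proved, stated in full; the proofs are below) =====
def Claim_equal_find_total_corners : Prop := ∀ (possible : List (Int × Int)), Dom_find_total_corners possible → Pre_find_total_corners possible → Spec_find_total_corners possible (find_total_corners possible)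

-- ===== LEMMAS AND PROOFS =====

-- corner value of one cell at one corner, as a function of the two side-neighbour and diagonal memberships
def pvCornerF (v1 v2 dg : Bool) : Int :=
  if v1 = false ∧ v2 = false then 1
  else if v1 = true ∧ v2 = true ∧ dg = false then 1
  else 0

-- B's per-point contribution as a function of the 2x2 block memberships
def pvG (a b c d : Bool) : Int :=
  let k : Int := (if a then 1 else 0) + (if b then 1 else 0) + (if c then 1 else 0) + (if d then 1 else 0)
  if k = 1 ∨ k = 3 then 1 else if k = 2 ∧ a = d then 2 else 0

def pvMem (S : Finset (Int × Int)) (x : Int × Int) : Bool := decide (x ∈ S)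

def pvOff : Fin 4 → Int × Int
  | 0 => (0, 0) | 1 => (1, 0) | 2 => (0, 1) | 3 => (1, 1)

def pvDir (i : Fin 4) : Int × Int := (2 * (pvOff i).1 - 1, 2 * (pvOff i).2 - 1)

def pvPointOf (c : Int × Int) (i : Fin 4) : Int × Int := (c.1 + (pvOff i).1, c.2 + (pvOff i).2)

def pvCellAt (p : Int × Int) (i : Fin 4) : Int × Int := (p.1 - (pvOff i).1, p.2 - (pvOff i).2)

-- A's corner value of cell ci.1 at corner direction ci.2, memberships read from S
def pvCC (S : Finset (Int × Int)) (ci : (Int × Int) × Fin 4) : Int :=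
  pvCornerF (pvMem S (ci.1.1 + (pvDir ci.2).1, ci.1.2))
            (pvMem S (ci.1.1, ci.1.2 + (pvDir ci.2).2))
            (pvMem S (ci.1.1 + (pvDir ci.2).1, ci.1.2 + (pvDir ci.2).2))

def pvGP (S : Finset (Int × Int)) (p : Int × Int) : Int :=
  pvG (pvMem S (p.1 - 1, p.2 - 1)) (pvMem S (p.1, p.2 - 1)) (pvMem S (p.1 - 1, p.2)) (pvMem S p)

def pvPts (c : Int × Int) : Finset (Int × Int) :=
  {(c.1, c.2), (c.1 + 1, c.2), (c.1, c.2 + 1), (c.1 + 1, c.2 + 1)}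

lemma contains_eq_pvMem (possible : List (Int × Int)) (x : Int × Int) :
    PySem.Set.contains possible x = pvMem possible.toFinset x := by
  simp [pvMem, PySem.Set.contains_eq_listContains]

lemma num_corners_eq (possible : List (Int × Int)) (u v dg : Int × Int) (h : u ≠ v) :
    pv_num_corners possible (PySem.Set.ofList [u, v]) dg
      = pvCornerF (PySem.Set.contains possible u) (PySem.Set.contains possible v)
          (PySem.Set.contains possible dg) := by
  have hvu : v ≠ u := Ne.symm h
  by_cases hu : u ∈ possible <;> by_cases hv : v ∈ possible <;> by_cases hd : dg ∈ possible <;>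
    simp [pv_num_corners, pvCornerF, List.filter, hu, hv, hd, PySem.Set.len,
      PySem.Set.ofList, PySem.Set.add, hvu]

def pvHA (possible : List (Int × Int)) (square : Int × Int) : Int :=
  pv_num_corners possible
      (PySem.Set.ofList [(square.1 - 1, square.2), (square.1, square.2 - 1)]) (square.1 - 1, square.2 - 1)
  + pv_num_corners possible
      (PySem.Set.ofList [(square.1 - 1, square.2), (square.1, square.2 + 1)]) (square.1 - 1, square.2 + 1)
  + pv_num_corners possible
      (PySem.Set.ofList [(square.1 + 1, square.2), (square.1, square.2 + 1)]) (square.1 + 1, square.2 + 1)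
  + pv_num_corners possible
      (PySem.Set.ofList [(square.1 + 1, square.2), (square.1, square.2 - 1)]) (square.1 + 1, square.2 - 1)

lemma pair_ne_of_fst (x1 y1 x2 y2 : Int) (h : x1 ≠ x2) : ((x1, y1) : Int × Int) ≠ (x2, y2) := by
  simp [Prod.ext_iff]; intro hc; exact absurd hc h

lemma cell_sum (possible : List (Int × Int)) (c : Int × Int) :
    ∑ i : Fin 4, pvCC possible.toFinset (c, i) = pvHA possible c := by
  rw [Fin.sum_univ_four]
  unfold pvHA
  rw [num_corners_eq _ _ _ _ (pair_ne_of_fst _ _ _ _ (by omega)),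
      num_corners_eq _ _ _ _ (pair_ne_of_fst _ _ _ _ (by omega)),
      num_corners_eq _ _ _ _ (pair_ne_of_fst _ _ _ _ (by omega)),
      num_corners_eq _ _ _ _ (pair_ne_of_fst _ _ _ _ (by omega))]
  simp only [pvCC, pvDir, pvOff, contains_eq_pvMem]
  ring_nf

lemma A_eq_sum (possible : List (Int × Int)) (hnd : possible.Nodup) :
    find_total_corners possible
      = ∑ ci ∈ possible.toFinset ×ˢ (Finset.univ : Finset (Fin 4)), pvCC possible.toFinset ci := by
  have hmap : find_total_corners possible = (possible.map (pvHA possible)).sum := by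
    suffices h : ∀ (l : List (Int × Int)) (init : Int),
        l.foldl (fun corners square =>
          let corners := corners + pv_num_corners possible
            (PySem.Set.ofList [(square.1 - 1, square.2), (square.1, square.2 - 1)]) (square.1 - 1, square.2 - 1)
          let corners := corners + pv_num_corners possible
            (PySem.Set.ofList [(square.1 - 1, square.2), (square.1, square.2 + 1)]) (square.1 - 1, square.2 + 1)
          let corners := corners + pv_num_corners possible
            (PySem.Set.ofList [(square.1 + 1, square.2), (square.1, square.2 + 1)]) (square.1 + 1, square.2 + 1)
          let corners := corners + pv_num_corners possible
            (PySem.Set.ofList [(square.1 + 1, square.2), (square.1, square.2 - 1)]) (square.1 + 1, square.2 - 1)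
          corners) init = init + (l.map (pvHA possible)).sum by
      simpa [find_total_corners] using h possible 0
    intro l
    induction l with
    | nil => intro init; simp
    | cons x xs ih =>
      intro init
      simp only [List.foldl_cons, List.map_cons, List.sum_cons, ih]
      unfold pvHA
      ring
  rw [hmap, ← List.sum_toFinset _ hnd, Finset.sum_product]
  exact Finset.sum_congr rfl fun c _ => (cell_sum possible c).symm

lemma contains_ofList_eq (possible : List (Int × Int)) (x : Int × Int) :
    PySem.Set.contains (PySem.Set.ofList possible) x = pvMem possible.toFinset x := by
  simp [pvMem, PySem.Set.contains_eq_listContains, PySem.Set.mem_ofList]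

lemma points_nodup (l acc : List (Int × Int)) (hacc : acc.Nodup) :
    (l.foldl (fun pts c =>
      PySem.Set.update pts [(c.1, c.2), (c.1 + 1, c.2), (c.1, c.2 + 1), (c.1 + 1, c.2 + 1)]) acc).Nodup := by
  induction l generalizing acc with
  | nil => exact hacc
  | cons x xs ih => exact ih _ (PySem.Set.nodup_update _ _ hacc)

lemma points_toFinset (l acc : List (Int × Int)) :
    (l.foldl (fun pts c =>
      PySem.Set.update pts [(c.1, c.2), (c.1 + 1, c.2), (c.1, c.2 + 1), (c.1 + 1, c.2 + 1)]) acc).toFinset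
      = acc.toFinset ∪ l.toFinset.biUnion pvPts := by
  induction l generalizing acc with
  | nil => simp
  | cons x xs ih =>
    rw [List.foldl_cons, ih, List.toFinset_cons, Finset.biUnion_insert]
    ext p
    simp only [List.mem_toFinset, PySem.Set.mem_update, Finset.mem_union, Finset.mem_insert,
      Finset.mem_singleton, pvPts, List.mem_cons, List.not_mem_nil, or_false, Prod.mk.eta]
    tauto

lemma B_fold (cells : List (Int × Int)) (l : List (Int × Int)) (init : Int) :
    l.foldl (fun total p =>
      let a := PySem.Set.contains cells (p.1 - 1, p.2 - 1)
      let b := PySem.Set.contains cells (p.1, p.2 - 1)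
      let c := PySem.Set.contains cells (p.1 - 1, p.2)
      let d := PySem.Set.contains cells (p.1, p.2)
      let k : Int := (if a then 1 else 0) + (if b then 1 else 0) + (if c then 1 else 0) + (if d then 1 else 0)
      if k = 1 ∨ k = 3 then total + 1
      else if k = 2 ∧ a = d then total + 2
      else total) init
    = init + (l.map (fun p => pvG (PySem.Set.contains cells (p.1 - 1, p.2 - 1))
        (PySem.Set.contains cells (p.1, p.2 - 1)) (PySem.Set.contains cells (p.1 - 1, p.2))
        (PySem.Set.contains cells (p.1, p.2)))).sum := by
  induction l generalizing init with
  | nil => simp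
  | cons x xs ih =>
    rw [List.foldl_cons, List.map_cons, List.sum_cons, ih]
    simp only [pvG]
    split_ifs <;> ring

lemma B_eq_sum (possible : List (Int × Int)) :
    find_total_corners_alt possible
      = ∑ p ∈ possible.toFinset.biUnion pvPts, pvGP possible.toFinset p := by
  unfold find_total_corners_alt
  rw [B_fold]
  have hL := points_toFinset (PySem.Set.ofList possible) PySem.Set.empty
  have hnd := points_nodup (PySem.Set.ofList possible) PySem.Set.empty (by simp [PySem.Set.empty])
  have hof : (PySem.Set.ofList possible).toFinset = possible.toFinset := by
    ext x; simp [PySem.Set.mem_ofList]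
  rw [← List.sum_toFinset _ hnd, hL, hof]
  simp only [PySem.Set.empty, List.toFinset_nil, Finset.empty_union, zero_add]
  exact Finset.sum_congr rfl fun p _ => by
    simp only [contains_ofList_eq, pvGP]

lemma pointOf_eq_iff (c : Int × Int) (i : Fin 4) (p : Int × Int) :
    pvPointOf c i = p ↔ c = pvCellAt p i := by
  fin_cases i <;> simp [pvPointOf, pvCellAt, pvOff, Prod.ext_iff] <;> omega

lemma fiber_eq (S : Finset (Int × Int)) (p : Int × Int) :
    ∑ ci ∈ (S ×ˢ (Finset.univ : Finset (Fin 4))).filter (fun ci => pvPointOf ci.1 ci.2 = p),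
        pvCC S ci = pvGP S p := by
  have hset : (S ×ˢ (Finset.univ : Finset (Fin 4))).filter (fun ci => pvPointOf ci.1 ci.2 = p)
      = ((Finset.univ : Finset (Fin 4)).filter (fun i => pvCellAt p i ∈ S)).image
          (fun i => (pvCellAt p i, i)) := by
    ext ⟨c, i⟩
    simp only [Finset.mem_filter, Finset.mem_product, Finset.mem_univ, and_true, true_and,
      Finset.mem_image, pointOf_eq_iff, Prod.mk.injEq]
    constructor
    · rintro ⟨hc, rfl⟩; exact ⟨i, hc, rfl, rfl⟩
    · rintro ⟨j, hj, rfl, rfl⟩; exact ⟨hj, rfl⟩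
  rw [hset, Finset.sum_image (by intro x hx y hy hxy; exact congrArg Prod.snd hxy),
      Finset.sum_filter, Fin.sum_univ_four]
  have e0 : pvCellAt p 0 = p := by simp [pvCellAt, pvOff]
  have e1 : pvCellAt p 1 = (p.1 - 1, p.2) := by simp [pvCellAt, pvOff]
  have e2 : pvCellAt p 2 = (p.1, p.2 - 1) := by simp [pvCellAt, pvOff]
  have e3 : pvCellAt p 3 = (p.1 - 1, p.2 - 1) := by simp [pvCellAt, pvOff]
  rw [e0, e1, e2, e3]
  simp only [pvCC, pvDir, pvOff, pvGP]
  norm_num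
  by_cases hA : (p.1 - 1, p.2 - 1) ∈ S <;> by_cases hB : (p.1, p.2 - 1) ∈ S <;>
    by_cases hC : (p.1 - 1, p.2) ∈ S <;> by_cases hD : p ∈ S <;>
      simp [pvMem, pvG, pvCornerF, ← sub_eq_add_neg, hA, hB, hC, hD]

lemma sums_eq (S : Finset (Int × Int)) :
    ∑ ci ∈ S ×ˢ (Finset.univ : Finset (Fin 4)), pvCC S ci
      = ∑ p ∈ S.biUnion pvPts, pvGP S p := by
  rw [← Finset.sum_fiberwise_of_maps_to (g := fun ci => pvPointOf ci.1 ci.2)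
      (t := S.biUnion pvPts) ?_ (pvCC S)]
  · exact Finset.sum_congr rfl fun p _ => fiber_eq S p
  · rintro ⟨c, i⟩ hci
    simp only [Finset.mem_product] at hci
    refine Finset.mem_biUnion.2 ⟨c, hci.1, ?_⟩
    fin_cases i <;> simp [pvPointOf, pvOff, pvPts]

-- ===== VERDICT (by name: the statement is the Claim_ definition above) =====
theorem find_total_corners_spec : Claim_equal_find_total_corners := by
  intro possible _ hpre
  unfold Spec_find_total_corners
  rw [A_eq_sum possible hpre, B_eq_sum possible, sums_eq]
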